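-- pv_equiv track=rewrite | github.com/tsiggaard/rsa-attacks | qs_impl.py | compute_factor_base
-- ===== SOURCE A (Python) =====
-- def compute_factor_base(N, B):
--     sieve = [True] * (B + 1)
--     sieve[0:2] = [False, False]
--     for i in range(2, int(B**0.5) + 1):
--         if sieve[i]:
--             sieve[i*i:B+1:i] = [False] * len(range(i*i, B + 1, i))
--
--     factor_base = [2] if N % 2 != 0 else []
--
--     for p in range(3, B + 1, 2):
--         if not sieve[p]:
--             continue
--         if pow(N, (p - 1) // 2, p) == 1:
--             factor_base.append(p)
--
--     return factor_base
-- ===== SOURCE B (Python) =====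
-- def _is_prime_odd(p):
--     d = 3
--     while d * d <= p:
--         if p % d == 0:
--             return False
--         d += 2
--     return True
--
--
-- def compute_factor_base(N, B):
--     factor_base = [2] if N % 2 != 0 else []
--     for p in range(3, B + 1, 2):
--         if _is_prime_odd(p) and pow(N, (p - 1) // 2, p) == 1:
--             factor_base.append(p)
--     return factor_base
-- ===== Notes on version B (the rewrite author's own statement) =====
-- stated objective: simpler
-- what changed: Replaces A's precomputed sieve-of-Eratosthenes table (build an array, then scan it) with an inline odd-step trial-division primality test per candidate, so no sieve array is ever built.
import Mathlib
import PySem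

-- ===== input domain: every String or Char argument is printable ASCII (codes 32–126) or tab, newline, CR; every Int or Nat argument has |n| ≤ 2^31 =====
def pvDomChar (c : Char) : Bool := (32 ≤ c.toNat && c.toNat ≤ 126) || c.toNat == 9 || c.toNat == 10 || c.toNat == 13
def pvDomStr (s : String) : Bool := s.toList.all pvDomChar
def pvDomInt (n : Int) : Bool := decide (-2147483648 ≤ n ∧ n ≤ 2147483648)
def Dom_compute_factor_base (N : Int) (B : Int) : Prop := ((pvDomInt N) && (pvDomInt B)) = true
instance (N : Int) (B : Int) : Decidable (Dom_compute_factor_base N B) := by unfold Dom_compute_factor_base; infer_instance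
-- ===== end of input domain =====

-- B replaces A's precomputed sieve table with inline trial division per odd candidate (simpler: no array is built);
-- the return values are proved equal for every B ≥ 0 (for B < 0 Python A raises TypeError on int(B**0.5)).

-- ===== PORT A =====
-- sieve[i*i : B+1 : i] = [False] * len(range(i*i, B+1, i))  (extended-slice assignment, element by element)
def pvMarkMults (B : Int) (s : List Bool) (i : Int) : List Bool :=
  (PySem.List.pyRange (i * i) (B + 1) i).foldl (fun s j => s.set j.toNat false) s

def pvSieve (B : Int) : List Bool :=
  -- sieve = [True] * (B+1); sieve[0:2] = [False, False]  (slice assignment: [False, False] ++ sieve[2:])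
  let sieve0 : List Bool := [false, false] ++ (List.replicate (B.toNat + 1) true).drop 2
  -- int(B**0.5) = Nat.sqrt B.toNat : exact for 0 ≤ B ≤ 2^31, where the float square root is exact
  (PySem.List.pyRange 2 ((Nat.sqrt B.toNat : Int) + 1) 1).foldl
    (fun s i => if s.getD i.toNat false then pvMarkMults B s i else s) sieve0

def compute_factor_base (N : Int) (B : Int) : List Int :=
  let sieve := pvSieve B
  let fb0 : List Int := if PySem.Int.mod N 2 ≠ 0 then [2] else []
  (PySem.List.pyRange 3 (B + 1) 2).foldl
    (fun fb p =>
      if !(sieve.getD p.toNat false) then fb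
      else if PySem.Int.powMod N (PySem.Int.floordiv (p - 1) 2).toNat p = 1 then fb ++ [p]
      else fb) fb0

-- ===== PORT B =====
-- _is_prime_odd: while d*d <= p: if p % d == 0: return False; d += 2; return True
def isPrimeOddGo (p : Int) (d : Int) : Bool :=
  if h : d * d ≤ p then
    if PySem.Int.mod p d = 0 then false
    else isPrimeOddGo p (d + 2)
  else true
termination_by (p + 2 - d).toNat
decreasing_by
  have h0 : 0 ≤ d * d := mul_self_nonneg d
  have hdp : d ≤ p := by
    rcases le_total d 0 with hd | hd
    · omega
    · nlinarith
  omega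

def compute_factor_base_alt (N : Int) (B : Int) : List Int :=
  (PySem.List.pyRange 3 (B + 1) 2).foldl
    (fun fb p =>
      if isPrimeOddGo p 3 && (PySem.Int.powMod N (PySem.Int.floordiv (p - 1) 2).toNat p == 1)
      then fb ++ [p] else fb)
    (if PySem.Int.mod N 2 ≠ 0 then [2] else [])

-- ===== PRECONDITION & SPEC =====
-- Pre_ excludes exactly B < 0, where Python A raises TypeError: B**0.5 is a complex number and int() rejects it.
def Pre_compute_factor_base (N : Int) (B : Int) : Prop := 0 ≤ B
instance (N : Int) (B : Int) : Decidable (Pre_compute_factor_base N B) := by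
  unfold Pre_compute_factor_base; infer_instance

def pvWitness_compute_factor_base : Int × Int := (35, 30)

def Spec_compute_factor_base (N : Int) (B : Int) (out : List Int) : Prop := out = compute_factor_base_alt N B
instance (N : Int) (B : Int) (out : List Int) : Decidable (Spec_compute_factor_base N B out) := by
  unfold Spec_compute_factor_base; infer_instance

-- ===== CLAIM (what is proved, stated in full; the proofs are below) =====
def Claim_equal_compute_factor_base : Prop := ∀ (N : Int) (B : Int), Dom_compute_factor_base N B → Pre_compute_factor_base N B → Spec_compute_factor_base N B (compute_factor_base N B)


-- ===== LEMMAS AND PROOFS =====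

-- "j has no divisor i with 2 ≤ i < m and i*i ≤ j" (the sieve invariant after processing 2..m-1)
def pvNoSmall (j m : Nat) : Prop := ∀ i, 2 ≤ i → i < m → i * i ≤ j → ¬ i ∣ j
-- "j has no divisor i with 2 ≤ i and i*i ≤ j"
def pvNoDiv (j : Nat) : Prop := ∀ i, 2 ≤ i → i * i ≤ j → ¬ i ∣ j

def pvInv (b m : Nat) (s : List Bool) : Prop :=
  s.length = b + 1 ∧ ∀ j, j ≤ b → (s.getD j false = true ↔ (2 ≤ j ∧ pvNoSmall j m))

lemma pv_len_foldl_set (L : List Int) (s : List Bool) :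
    (L.foldl (fun s x => s.set x.toNat false) s).length = s.length := by
  induction L generalizing s with
  | nil => rfl
  | cons k L ih => simp [List.foldl_cons, ih, List.length_set]

lemma pv_foldl_set_false_stable (L : List Int) (s : List Bool) (j : Nat)
    (h : s.getD j false = false) :
    (L.foldl (fun s x => s.set x.toNat false) s).getD j false = false := by
  induction L generalizing s with
  | nil => exact h
  | cons k L ih =>
    refine ih _ ?_
    simp only [List.getD_eq_getElem?_getD, List.getElem?_set] at h ⊢
    split_ifs with h1 h2 <;> simp_all

lemma pv_foldl_set_not_mem (L : List Int) (s : List Bool) (j : Nat)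
    (h : ∀ x ∈ L, x.toNat ≠ j) :
    (L.foldl (fun s x => s.set x.toNat false) s).getD j false = s.getD j false := by
  induction L generalizing s with
  | nil => rfl
  | cons k L ih =>
    rw [List.foldl_cons, ih _ (fun x hx => h x (List.mem_cons_of_mem _ hx))]
    simp only [List.getD_eq_getElem?_getD, List.getElem?_set]
    have := h k (List.mem_cons_self)
    split_ifs <;> simp_all

lemma pv_foldl_set_mem (L : List Int) (s : List Bool) (j : Nat)
    (hj : j < s.length) (h : ∃ x ∈ L, x.toNat = j) :
    (L.foldl (fun s x => s.set x.toNat false) s).getD j false = false := by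
  induction L generalizing s with
  | nil => simp at h
  | cons k L ih =>
    rw [List.foldl_cons]
    rcases h with ⟨x, hx, hxj⟩
    rcases List.mem_cons.mp hx with rfl | hxL
    · apply pv_foldl_set_false_stable
      simp only [List.getD_eq_getElem?_getD, List.getElem?_set, hxj]
      simp [hj]
    · exact ih _ (by simpa [List.length_set] using hj) ⟨x, hxL, hxj⟩

lemma pv_mark_getD (B : Int) (s : List Bool) (i : Int) (h2 : 2 ≤ i)
    (hlen : s.length = B.toNat + 1) (j : Nat) (hj : j ≤ B.toNat) (hB : 0 ≤ B) :
    (pvMarkMults B s i).getD j false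
      = if i * i ≤ (j : Int) ∧ i ∣ (j : Int) then false else s.getD j false := by
  have hi : (0 : Int) < i := by omega
  split_ifs with hc
  · apply pv_foldl_set_mem _ _ _ (by omega)
    refine ⟨(j : Int), ?_, by simp⟩
    rw [PySem.List.mem_pyRange_iff_of_pos hi]
    refine ⟨hc.1, by omega, ?_⟩
    exact dvd_sub hc.2 (Dvd.intro i rfl)
  · apply pv_foldl_set_not_mem
    intro x hx hxj
    rw [PySem.List.mem_pyRange_iff_of_pos hi] at hx
    have hx0 : 0 ≤ x := by nlinarith [hx.1]
    have hxeq : x = (j : Int) := by omega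
    subst hxeq
    refine hc ⟨hx.1, ?_⟩
    have := dvd_add hx.2.2 (Dvd.intro i rfl : i ∣ i * i)
    simpa using this

lemma pv_noSmall_self_iff_prime (m : Nat) (h2 : 2 ≤ m) : pvNoSmall m m ↔ m.Prime := by
  constructor
  · intro h
    by_contra hnp
    have hq := Nat.minFac_prime (by omega : m ≠ 1)
    have hqd := Nat.minFac_dvd m
    have hqsq : m.minFac ^ 2 ≤ m := Nat.minFac_sq_le_self (by omega) hnp
    have hq2 := hq.two_le
    have hqlt : m.minFac < m := by
      rcases Nat.lt_or_ge m.minFac m with h' | h'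
      · exact h'
      · exfalso; nlinarith [hqsq]
    exact h m.minFac hq2 hqlt (by nlinarith [hqsq]) hqd
  · intro hp i hi2 hilt _ hdvd
    exact (Nat.prime_def_lt'.mp hp).2 i hi2 hilt hdvd

lemma pv_noSmall_succ_of_not_prime (j m : Nat) (h2 : 2 ≤ m) (hnp : ¬ m.Prime)
    (h : pvNoSmall j m) : pvNoSmall j (m + 1) := by
  intro i hi2 hilt hisq hdvd
  rcases Nat.lt_or_ge i m with h' | h'
  · exact h i hi2 h' hisq hdvd
  · have him : i = m := by omega
    subst him
    have hq := Nat.minFac_prime (by omega : i ≠ 1)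
    have hqd : i.minFac ∣ j := (Nat.minFac_dvd i).trans hdvd
    have hqsq : i.minFac ^ 2 ≤ i := Nat.minFac_sq_le_self (by omega) hnp
    have hqlt : i.minFac < i := by
      rcases Nat.lt_or_ge i.minFac i with h'' | h''
      · exact h''
      · exfalso; nlinarith [hqsq]
    exact h i.minFac hq.two_le hqlt (by nlinarith) hqd

lemma pv_noSmall_succ_iff (j m : Nat) (hnot : ¬ (m * m ≤ j ∧ m ∣ j)) :
    pvNoSmall j (m + 1) ↔ pvNoSmall j m := by
  constructor
  · intro h i hi2 hilt hisq hdvd; exact h i hi2 (by omega) hisq hdvd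
  · intro h i hi2 hilt hisq hdvd
    rcases Nat.lt_or_ge i m with h' | h'
    · exact h i hi2 h' hisq hdvd
    · have : i = m := by omega
      subst this
      exact hnot ⟨hisq, hdvd⟩

-- one iteration of the sieve loop preserves the invariant
lemma pv_step (B : Int) (hB : 0 ≤ B) (i : Int) (h2 : 2 ≤ i) (hm : i.toNat ≤ B.toNat)
    (s : List Bool) (hInv : pvInv B.toNat i.toNat s) :
    pvInv B.toNat (i.toNat + 1) (if s.getD i.toNat false then pvMarkMults B s i else s) := by
  obtain ⟨hlen, hchar⟩ := hInv
  have h2n : 2 ≤ i.toNat := by omega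
  have hguard : s.getD i.toNat false = true ↔ i.toNat.Prime := by
    rw [hchar i.toNat hm]
    constructor
    · rintro ⟨_, h⟩; exact (pv_noSmall_self_iff_prime _ h2n).mp h
    · intro hp; exact ⟨h2n, (pv_noSmall_self_iff_prime _ h2n).mpr hp⟩
  by_cases hg : s.getD i.toNat false = true
  · -- i is prime: its multiples from i*i get marked
    have hp : i.toNat.Prime := hguard.mp hg
    rw [if_pos hg]
    refine ⟨by rw [pvMarkMults, pv_len_foldl_set, hlen], ?_⟩
    intro j hj
    rw [pv_mark_getD B s i h2 hlen j hj hB]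
    have hcast : (i * i ≤ (j : Int) ∧ i ∣ (j : Int)) ↔ (i.toNat * i.toNat ≤ j ∧ i.toNat ∣ j) := by
      have hi : i = (i.toNat : Int) := by omega
      rw [hi]
      constructor
      · rintro ⟨ha, hb⟩; exact ⟨by exact_mod_cast ha, by exact_mod_cast hb⟩
      · rintro ⟨ha, hb⟩; exact ⟨by exact_mod_cast ha, by exact_mod_cast hb⟩
    split_ifs with hc
    · simp only [false_iff]
      rintro ⟨hj2, hns⟩
      have := hcast.mp hc
      exact hns i.toNat h2n (by omega) this.1 this.2
    · rw [hchar j hj]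
      have hnot : ¬ (i.toNat * i.toNat ≤ j ∧ i.toNat ∣ j) := fun h => hc (hcast.mpr h)
      rw [pv_noSmall_succ_iff j i.toNat hnot]
  · -- i is composite (or stays unmarked): nothing changes, invariant extends
    rw [if_neg hg]
    refine ⟨hlen, ?_⟩
    intro j hj
    rw [hchar j hj]
    have hnp : ¬ i.toNat.Prime := fun h => hg (hguard.mpr h)
    constructor
    · rintro ⟨hj2, hns⟩; exact ⟨hj2, pv_noSmall_succ_of_not_prime j i.toNat h2n hnp hns⟩
    · rintro ⟨hj2, hns⟩
      refine ⟨hj2, fun k hk2 hklt hksq hkd => hns k hk2 (by omega) hksq hkd⟩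

lemma pv_sieve_loop (B : Int) (hB : 0 ≤ B) :
    ∀ (n : Nat) (m : Int) (s : List Bool), 2 ≤ m → m ≤ (Nat.sqrt B.toNat : Int) + 1 →
    n = ((Nat.sqrt B.toNat : Int) + 1 - m).toNat →
    pvInv B.toNat m.toNat s →
    pvInv B.toNat (Nat.sqrt B.toNat + 1)
      ((PySem.List.pyRange m ((Nat.sqrt B.toNat : Int) + 1) 1).foldl
        (fun s i => if s.getD i.toNat false then pvMarkMults B s i else s) s) := by
  intro n
  induction n with
  | zero =>
    intro m s h2 hle hn hInv
    have hm : m = (Nat.sqrt B.toNat : Int) + 1 := by omega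
    rw [PySem.List.pyRange_one_eq_nil (by omega)]
    have : m.toNat = Nat.sqrt B.toNat + 1 := by omega
    rw [this] at hInv
    exact hInv
  | succ n ih =>
    intro m s h2 hle hn hInv
    have hlt : m < (Nat.sqrt B.toNat : Int) + 1 := by omega
    rw [PySem.List.pyRange_one_cons hlt, List.foldl_cons]
    have hmB : m.toNat ≤ B.toNat := by
      have := Nat.sqrt_le_self B.toNat
      omega
    have hstep := pv_step B hB m h2 hmB s hInv
    have h1 : (m + 1).toNat = m.toNat + 1 := by omega
    refine ih (m + 1) _ (by omega) (by omega) (by omega) ?_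
    rw [h1]
    exact hstep

lemma pv_sieve0_getD (n j : Nat) :
    (([false, false] ++ List.replicate n true).getD j false = true) ↔ (2 ≤ j ∧ j < n + 2) := by
  match j with
  | 0 => simp
  | 1 => simp
  | (k + 2) =>
    simp only [List.cons_append, List.nil_append, List.getD_eq_getElem?_getD,
      List.getElem?_cons_succ, List.getElem?_replicate]
    split_ifs with h <;> simp <;> omega

lemma pv_sieve0_inv (B : Int) (hB : 1 ≤ B) :
    pvInv B.toNat 2 ([false, false] ++ (List.replicate (B.toNat + 1) true).drop 2) := by
  have hb1 : 1 ≤ B.toNat := by omega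
  have hdrop : (List.replicate (B.toNat + 1) true).drop 2 = List.replicate (B.toNat - 1) true := by
    rw [List.drop_replicate]
    congr 1
  rw [hdrop]
  constructor
  · simp only [List.length_append, List.length_cons, List.length_nil, List.length_replicate]
    omega
  · intro j hj
    rw [pv_sieve0_getD]
    constructor
    · rintro ⟨h2, -⟩
      exact ⟨h2, fun i hi2 hilt _ _ => by omega⟩
    · rintro ⟨h2, -⟩
      exact ⟨h2, by omega⟩

lemma pv_sieve_char (B : Int) (hB : 3 ≤ B) (j : Nat) (hj2 : 2 ≤ j) (hj : j ≤ B.toNat) :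
    ((pvSieve B).getD j false = true) ↔ pvNoDiv j := by
  have hloop := pv_sieve_loop B (by omega) ((Nat.sqrt B.toNat : Int) + 1 - 2).toNat 2
    ([false, false] ++ (List.replicate (B.toNat + 1) true).drop 2)
    (by omega)
    (by
      have : 1 ≤ Nat.sqrt B.toNat := by
        rw [Nat.le_sqrt]; omega
      omega)
    rfl
    (pv_sieve0_inv B (by omega))
  rw [pvSieve]
  rw [hloop.2 j hj]
  constructor
  · rintro ⟨-, hns⟩ i hi2 hisq hdvd
    have hisqrt : i ≤ Nat.sqrt B.toNat := by
      rw [Nat.le_sqrt]; omega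
    exact hns i hi2 (by omega) hisq hdvd
  · intro hnd
    exact ⟨hj2, fun i hi2 _ hisq hdvd => hnd i hi2 hisq hdvd⟩

-- characterization of the trial-division loop, for odd p ≥ 3 and odd d ≥ 3 with no divisor below d
lemma pv_go_char (p : Int) (hp : 3 ≤ p) (hodd : ¬ (2 : Int) ∣ p) :
    ∀ (n : Nat) (d : Int), 3 ≤ d → ¬ (2 : Int) ∣ d → n = (p + 2 - d).toNat →
    (∀ i : Int, 2 ≤ i → i < d → i * i ≤ p → ¬ i ∣ p) →
    (isPrimeOddGo p d = true ↔ ∀ i : Int, 2 ≤ i → i * i ≤ p → ¬ i ∣ p) := by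
  intro n
  induction n using Nat.strong_induction_on with
  | _ n ih =>
  intro d h3 hdodd hn hbelow
  rw [isPrimeOddGo]
  by_cases hdd : d * d ≤ p
  · rw [dif_pos hdd]
    by_cases hmod : PySem.Int.mod p d = 0
    · rw [if_pos hmod]
      have hdvd : d ∣ p := (PySem.Int.mod_eq_zero_iff_dvd p d).mp hmod
      constructor
      · intro h
        exact absurd h (by simp)
      · intro h
        exact absurd hdvd (h d (by omega) hdd)
    · rw [if_neg hmod]
      have hddp : d ≤ p := by nlinarith
      have h3d : 3 * d ≤ p := by nlinarith
      refine ih ((p + 2 - (d + 2)).toNat) (by omega) (d + 2) (by omega) (by omega) rfl ?_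
      intro i hi2 hilt hisq hdvd
      rcases lt_or_ge i d with h' | h'
      · exact hbelow i hi2 h' hisq hdvd
      · rcases eq_or_lt_of_le h' with rfl | h''
        · exact hmod ((PySem.Int.mod_eq_zero_iff_dvd p d).mpr hdvd)
        · -- i = d + 1 is even, and an even divisor of the odd p is impossible
          have h2i : (2 : Int) ∣ i := by omega
          exact hodd (dvd_trans h2i hdvd)
  · rw [dif_neg hdd]
    constructor
    · intro _ i hi2 hisq hdvd
      rcases lt_or_ge i d with h' | h'
      · exact hbelow i hi2 h' hisq hdvd
      · exfalso; nlinarith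
    · intro _; rfl

-- bridge Int-quantified "no divisor" to the Nat-side sieve predicate
lemma pv_noDiv_int (p : Int) (hp : 0 ≤ p) :
    (∀ i : Int, 2 ≤ i → i * i ≤ p → ¬ i ∣ p) ↔ pvNoDiv p.toNat := by
  constructor
  · intro h i hi2 hisq hdvd
    refine h (i : Int) (by exact_mod_cast hi2) ?_ ?_
    · omega
    · have : (i : Int) ∣ (p.toNat : Int) := Int.natCast_dvd_natCast.mpr hdvd
      rwa [Int.toNat_of_nonneg hp] at this
  · intro h i hi2 hisq hdvd
    have hi0 : 0 ≤ i := by omega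
    have hti : ((i.toNat : Int)) = i := Int.toNat_of_nonneg hi0
    have htp : ((p.toNat : Int)) = p := Int.toNat_of_nonneg hp
    have h1 : i.toNat * i.toNat ≤ p.toNat := by
      have h' : ((i.toNat : Int)) * (i.toNat : Int) ≤ (p.toNat : Int) := by
        rw [hti, htp]; exact hisq
      exact_mod_cast h'
    have h2 : i.toNat ∣ p.toNat := by
      rw [← Int.natCast_dvd_natCast]
      rwa [hti, htp]
    exact h i.toNat (by omega) h1 h2

-- for each p the loop visits, A's sieve lookup equals B's trial-division test
lemma pv_point (B p : Int) (hmem : p ∈ PySem.List.pyRange 3 (B + 1) 2) :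
    (pvSieve B).getD p.toNat false = isPrimeOddGo p 3 := by
  rw [PySem.List.mem_pyRange_iff_of_pos (by omega)] at hmem
  obtain ⟨hp3, hpB, hdvd⟩ := hmem
  have hodd : ¬ (2 : Int) ∣ p := by omega
  have hB3 : 3 ≤ B := by omega
  have hchar := pv_sieve_char B hB3 p.toNat (by omega) (by omega)
  have hgo := pv_go_char p hp3 hodd (p + 2 - 3).toNat 3 (by omega) (by omega) rfl
    (by intro i hi2 hilt hisq hd; interval_cases i; exact hodd hd)
  have hiff : ((pvSieve B).getD p.toNat false = true ↔ isPrimeOddGo p 3 = true) := by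
    rw [hchar, hgo, pv_noDiv_int p (by omega)]
  cases h1 : (pvSieve B).getD p.toNat false <;> cases h2 : isPrimeOddGo p 3 <;> simp_all

-- ===== VERDICT (by name: the statement is the Claim_ definition above) =====
theorem compute_factor_base_spec : Claim_equal_compute_factor_base := by
  intro N B _ _
  unfold Spec_compute_factor_base
  simp only [compute_factor_base, compute_factor_base_alt]
  apply PySem.List.foldl_congr_mem
  intro acc p hp
  rw [← pv_point B p hp]
  cases hs : (pvSieve B).getD p.toNat false
  · simp
  · simp
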